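-- pv_equiv track=rewrite | github.com/thecesspit/AdventOfCode2023 | Day2.py | day2b_power
-- ===== SOURCE A (Python) =====
-- def day2b_power(game_dict):
--     test_result = 0
--
--     # Now for each game, see if the cubes are over our limits
--     for key, game in game_dict.items():
--         game_max = {'red':  0, 'green': 0, 'blue': 0}
--         power = 1
--         for result in game:
--             for colour in game_max.keys():
--                 if (colour in result) and (game_max[colour] < result[colour]):
--                     game_max[colour] = result[colour]
--         for value in game_max.values():
--             power = power * value
--         test_result += power
--
--     return test_result
-- ===== SOURCE B (Python) =====
-- def day2b_power(game_dict):
--     def colour_max(game, colour):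
--         return max([0] + [res[colour] for res in game if colour in res])
--     return sum(colour_max(g, 'red') * colour_max(g, 'green') * colour_max(g, 'blue')
--                for g in game_dict.values())
-- ===== Notes on version B (the rewrite author's own statement) =====
-- stated objective: simpler
-- what changed: Replaces A's combined pass that mutates a three-key accumulator dict per result with three independent per-colour maxima (max with a 0 floor over a comprehension) multiplied and summed in one expression.
import Mathlib
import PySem

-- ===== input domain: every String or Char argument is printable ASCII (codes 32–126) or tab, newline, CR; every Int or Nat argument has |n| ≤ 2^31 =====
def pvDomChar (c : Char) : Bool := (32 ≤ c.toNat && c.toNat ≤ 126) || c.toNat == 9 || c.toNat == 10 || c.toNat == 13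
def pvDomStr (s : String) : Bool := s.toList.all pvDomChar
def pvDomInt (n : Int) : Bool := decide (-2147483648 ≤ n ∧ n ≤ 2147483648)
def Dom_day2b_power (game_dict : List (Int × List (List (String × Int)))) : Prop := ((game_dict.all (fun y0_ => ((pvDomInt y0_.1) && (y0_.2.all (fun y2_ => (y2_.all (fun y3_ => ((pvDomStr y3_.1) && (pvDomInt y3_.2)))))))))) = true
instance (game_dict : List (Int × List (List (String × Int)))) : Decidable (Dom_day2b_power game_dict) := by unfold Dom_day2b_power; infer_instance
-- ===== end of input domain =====

-- B replaces A's combined per-game pass over a mutating three-key accumulator dict with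
-- three independent per-colour maxima (floored at 0) multiplied and summed: simpler decomposition.


-- ===== PORT A =====
-- inner loop body: for colour in game_max.keys(): if colour in result and game_max[colour] < result[colour]: …
def day2bStep (gm : PySem.Dict String Int) (result : List (String × Int)) : PySem.Dict String Int :=
  let rd := PySem.Dict.ofList result
  gm.keys.foldl (fun gm2 colour =>
    match rd.get? colour with          -- 'colour in result' + 'result[colour]'
    | some x => if gm2.getD colour 0 < x then gm2.insert colour x else gm2
    | none => gm2) gm

def day2b_power (game_dict : List (Int × List (List (String × Int)))) : Int :=
  (PySem.Dict.ofList game_dict).items.foldl (fun test_result kg =>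
    let game := kg.2
    let game_max := game.foldl day2bStep
      (PySem.Dict.ofList [("red", (0 : Int)), ("green", 0), ("blue", 0)])
    let power := game_max.values.foldl (fun p v => p * v) 1
    test_result + power) 0

-- ===== PORT B =====
-- max([0] + [res[colour] for res in game if colour in res])
def colourMax (game : List (List (String × Int))) (colour : String) : Int :=
  match PySem.List.max? ((0 : Int) :: game.filterMap (fun res => (PySem.Dict.ofList res).get? colour)) (fun y => y) with
  | some v => v
  | none => 0

def day2b_power_alt (game_dict : List (Int × List (List (String × Int)))) : Int :=
  (((PySem.Dict.ofList game_dict).values).map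
    (fun g => colourMax g "red" * colourMax g "green" * colourMax g "blue")).foldl (· + ·) 0

-- ===== PRECONDITION & SPEC =====
def Spec_day2b_power (game_dict : List (Int × List (List (String × Int)))) (out : Int) : Prop := out = day2b_power_alt game_dict
instance (game_dict : List (Int × List (List (String × Int)))) (out : Int) : Decidable (Spec_day2b_power game_dict out) := by unfold Spec_day2b_power; infer_instance

-- ===== CLAIM (what is proved, stated in full; the proofs are below) =====
def Claim_equal_day2b_power : Prop := ∀ (game_dict : List (Int × List (List (String × Int)))), Dom_day2b_power game_dict → Spec_day2b_power game_dict (day2b_power game_dict)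

-- ===== LEMMAS AND PROOFS =====

-- one step of A's inner loop on the canonical three-key accumulator
def colUpd (result : List (String × Int)) (colour : String) (v : Int) : Int :=
  match (PySem.Dict.ofList result).get? colour with
  | some x => if v < x then x else v
  | none => v

set_option maxHeartbeats 1000000 in
theorem day2bStep_shape (r g b : Int) (result : List (String × Int)) :
    day2bStep (PySem.Dict.mk [("red", r), ("green", g), ("blue", b)]) result =
      PySem.Dict.mk [("red", colUpd result "red" r), ("green", colUpd result "green" g),
                     ("blue", colUpd result "blue" b)] := by
  unfold day2bStep colUpd
  cases hr : (PySem.Dict.ofList result).get? "red" <;>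
  cases hg : (PySem.Dict.ofList result).get? "green" <;>
  cases hb : (PySem.Dict.ofList result).get? "blue" <;>
    simp only [PySem.Dict.keys_mk, List.map, List.foldl, hr, hg, hb] <;>
    simp [PySem.Dict.getD_eq_get?_getD, PySem.Dict.get?_mk_cons, PySem.Dict.insert,
          PySem.Dict.contains] <;>
    split_ifs <;>
      first
        | rfl
        | (apply PySem.Dict.ext
           simp_all [PySem.Dict.get?_mk_cons])

theorem foldl_day2bStep (game : List (List (String × Int))) (r g b : Int) :
    game.foldl day2bStep (PySem.Dict.mk [("red", r), ("green", g), ("blue", b)]) =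
      PySem.Dict.mk [("red", game.foldl (fun v res => colUpd res "red" v) r),
                     ("green", game.foldl (fun v res => colUpd res "green" v) g),
                     ("blue", game.foldl (fun v res => colUpd res "blue" v) b)] := by
  induction game generalizing r g b with
  | nil => rfl
  | cons res t ih => simp [List.foldl, day2bStep_shape, ih]

theorem foldl_colUpd_eq_max (game : List (List (String × Int))) (c : String) (a : Int) :
    game.foldl (fun v res => colUpd res c v) a =
      (game.filterMap (fun res => (PySem.Dict.ofList res).get? c)).foldl max a := by
  induction game generalizing a with
  | nil => rfl
  | cons res t ih =>
    simp only [List.foldl, List.filterMap_cons]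
    cases h : (PySem.Dict.ofList res).get? c with
    | none =>
      rw [show colUpd res c a = a from by simp [colUpd, h]]
      exact ih a
    | some x =>
      simp only [List.foldl]
      rw [show colUpd res c a = max a x from by simp only [colUpd, h]; omega]
      exact ih (max a x)

theorem colourMax_eq (game : List (List (String × Int))) (c : String) :
    colourMax game c =
      (game.filterMap (fun res => (PySem.Dict.ofList res).get? c)).foldl max 0 := by
  unfold colourMax
  rw [PySem.List.max?_id_cons]

-- per-game value agreement
theorem power_eq (game : List (List (String × Int))) :
    ((game.foldl day2bStep
        (PySem.Dict.ofList [("red", (0 : Int)), ("green", 0), ("blue", 0)])).values).foldl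
          (fun p v => p * v) 1 =
      colourMax game "red" * colourMax game "green" * colourMax game "blue" := by
  have h0 : PySem.Dict.ofList [("red", (0 : Int)), ("green", 0), ("blue", 0)] =
      PySem.Dict.mk [("red", 0), ("green", 0), ("blue", 0)] := by decide
  rw [h0, foldl_day2bStep]
  simp [PySem.Dict.values, List.foldl, colourMax_eq, foldl_colUpd_eq_max, one_mul]

-- ===== VERDICT (by name: the statement is the Claim_ definition above) =====
theorem day2b_power_spec : Claim_equal_day2b_power := by
  intro gd _
  unfold Spec_day2b_power day2b_power day2b_power_alt
  rw [show (PySem.Dict.ofList gd).values = (PySem.Dict.ofList gd).items.map (·.2) from rfl,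
      List.map_map, List.foldl_map]
  simp only [power_eq, Function.comp]
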